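-- pv_equiv track=rewrite | github.com/personal-algorithm-study/boj-java | programmers/python/level3/problem12987.py | solution
-- ===== SOURCE A (Python) =====
-- import collections
--
-- def solution(A, B):
--     A.sort()
--     B.sort()
--     n = len(A)
--     answer = 0
--
--     q = collections.deque(B)
--     for i in range(n - 1, -1, -1):
--         if len(q) == 0:
--             break
--
--         if q[-1] > A[i]:
--             answer += 1
--             q.pop()
--         else:
--             q.popleft()
--     return answer
-- ===== SOURCE B (Python) =====
-- def solution(A, B):
--     # Binary search on the answer k: k wins are achievable iff the k largest
--     # cards of B pairwise beat the k smallest cards in play of A (only the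
--     # largest len(B) cards of A are ever in play).  Feasibility is monotone
--     # in k, so the answer is the largest feasible k.
--     A.sort()
--     B.sort()
--     a = A[max(0, len(A) - len(B)):]
--
--     def ok(k):
--         return all(a[j] < B[len(B) - k + j] for j in range(k))
--
--     lo, hi = 0, min(len(a), len(B))
--     while lo < hi:
--         mid = (lo + hi + 1) // 2
--         if ok(mid):
--             lo = mid
--         else:
--             hi = mid - 1
--     return lo
-- ===== Notes on version B (the rewrite author's own statement) =====
-- stated objective: alternative
-- what changed: Replaces A's backward greedy scan over A with a deque window over B by a binary search on the answer k, each step checking in one pass whether the k largest cards of B pairwise beat the k smallest in-play cards of A (feasibility is monotone in k).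
import Mathlib
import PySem

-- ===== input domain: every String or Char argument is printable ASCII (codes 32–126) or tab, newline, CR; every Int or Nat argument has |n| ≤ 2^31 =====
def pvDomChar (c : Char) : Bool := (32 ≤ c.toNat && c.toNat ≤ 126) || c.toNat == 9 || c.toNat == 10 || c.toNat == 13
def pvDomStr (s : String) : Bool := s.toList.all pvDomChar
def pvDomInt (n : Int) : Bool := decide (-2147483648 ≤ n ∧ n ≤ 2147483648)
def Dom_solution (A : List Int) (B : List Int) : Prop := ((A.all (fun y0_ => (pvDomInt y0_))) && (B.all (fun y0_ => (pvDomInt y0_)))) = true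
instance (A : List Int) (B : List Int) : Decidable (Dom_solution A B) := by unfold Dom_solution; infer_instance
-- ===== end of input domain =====

-- B replaces A's backward greedy scan over A with a deque window over B by a binary
-- search on the answer k, each probe checking whether the k largest cards of B
-- pairwise beat the k smallest in-play cards of A (alternative algorithm; same
-- return value everywhere; like A, B sorts its list arguments in place).

-- ===== PORT A =====
-- the for-loop over range(n-1,-1,-1) with state (q, answer); 'break' returns answer
def pvLoopA (As : List Int) : List Int → List Int → Int → Int
  | [], _q, ans => ans
  | i :: rest, q, ans =>
    if q.length = 0 then ans
    else if PySem.List.pyGetD q (-1) 0 > PySem.List.pyGetD As i 0 then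
      pvLoopA As rest q.dropLast (ans + 1)
    else
      pvLoopA As rest q.tail ans

def solution (A : List Int) (B : List Int) : Int :=
  let As := PySem.List.sorted A id false
  let Bs := PySem.List.sorted B id false
  let n : Int := (As.length : Int)
  pvLoopA As (PySem.List.pyRange (n - 1) (-1) (-1)) Bs 0

-- ===== PORT B =====
-- ok(k): all(a[j] < B[len(B) - k + j] for j in range(k))
def pvOk (a B : List Int) (k : Int) : Bool :=
  (PySem.List.pyRange 0 k 1).all
    (fun j => decide (PySem.List.pyGetD a j 0 < PySem.List.pyGetD B ((B.length : Int) - k + j) 0))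

-- the 'while lo < hi' binary-search loop on state (lo, hi)
def pvBS (a B : List Int) (lo hi : Int) : Int :=
  if h : lo < hi then
    let mid := PySem.Int.floordiv (lo + hi + 1) 2
    if pvOk a B mid then pvBS a B mid hi else pvBS a B lo (mid - 1)
  else lo
termination_by (hi - lo).toNat
decreasing_by
  all_goals
    have hb := PySem.Int.floordiv_two_mid_bounds (lo := lo + 1) (hi := hi) (by omega)
    have he : lo + 1 + hi = lo + hi + 1 := by ring
    rw [he] at hb
    omega

def solution_alt (A : List Int) (B : List Int) : Int :=
  let As := PySem.List.sorted A id false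
  let Bs := PySem.List.sorted B id false
  let a := PySem.List.slice As (some (max 0 ((As.length : Int) - (Bs.length : Int)))) none
  pvBS a Bs 0 (min ((a.length : Int)) ((Bs.length : Int)))

-- ===== PRECONDITION & SPEC =====
def Spec_solution (A : List Int) (B : List Int) (out : Int) : Prop := out = solution_alt A B
instance (A : List Int) (B : List Int) (out : Int) : Decidable (Spec_solution A B out) := by unfold Spec_solution; infer_instance

-- ===== CLAIM (what is proved, stated in full; the proofs are below) =====
def Claim_equal_solution : Prop := ∀ (A : List Int) (B : List Int), Dom_solution A B → Spec_solution A B (solution A B)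

-- ===== LEMMAS AND PROOFS =====

-- forward greedy (the common mathematical model of both programs' answers)
def pvG : List Int → List Int → Int
  | _, [] => 0
  | [], _ :: _ => 0
  | a :: as, b :: bs => if b > a then 1 + pvG as bs else pvG (a :: as) bs

theorem pvG_nil (bs : List Int) : pvG [] bs = 0 := by cases bs <;> rfl

theorem pvG_nonneg : ∀ (as bs : List Int), 0 ≤ pvG as bs := by
  intro as
  induction as with
  | nil => intro bs; simp [pvG_nil]
  | cons a as' ih =>
    intro bs
    induction bs with
    | nil => simp [pvG]
    | cons b bs' ihb =>
      simp only [pvG]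
      by_cases hb : b > a
      · rw [if_pos hb]; have := ih bs'; omega
      · rw [if_neg hb]; exact ihb

theorem pvG_le_right : ∀ (bs as : List Int), pvG as bs ≤ (bs.length : Int) := by
  intro bs
  induction bs with
  | nil => intro as; cases as <;> simp [pvG]
  | cons b bs' ih =>
    intro as
    cases as with
    | nil => simp [pvG_nil]; omega
    | cons a as' =>
      simp only [pvG]
      by_cases hb : b > a
      · rw [if_pos hb]; have := ih as'; simp; omega
      · rw [if_neg hb]; have := ih (a :: as'); simp; omega

theorem pvG_le_left : ∀ (as bs : List Int), pvG as bs ≤ (as.length : Int) := by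
  intro as
  induction as with
  | nil => intro bs; simp [pvG_nil]
  | cons a as' ih =>
    intro bs
    induction bs with
    | nil => simp [pvG]; omega
    | cons b bs' ihb =>
      simp only [pvG]
      by_cases hb : b > a
      · rw [if_pos hb]; have := ih bs'; simp; omega
      · rw [if_neg hb]; have := ihb; simp at this ⊢; omega

-- sacrifice greedy on a descending list of A-cards (model of A's loop)
def pvH : List Int → List Int → Int
  | [], _ => 0
  | a :: ad, bs =>
    if bs.length = 0 then 0
    else if PySem.List.pyGetD bs (-1) 0 > a then 1 + pvH ad bs.dropLast
    else pvH ad bs.tail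

-- L3: a card a that no b beats, appended at the end of A, changes nothing
theorem pvG_append_unbeaten (a : Int) :
    ∀ (bs as : List Int), (∀ b ∈ bs, b ≤ a) → pvG (as ++ [a]) bs = pvG as bs := by
  intro bs
  induction bs with
  | nil => intro as _; simp [pvG]
  | cons b bs2 ih =>
    intro as hb
    have hba : b ≤ a := hb b (by simp)
    cases as with
    | nil =>
      simp only [List.nil_append, pvG, if_neg (by omega : ¬ b > a)]
      rw [show pvG [a] bs2 = pvG ([] ++ [a]) bs2 by simp]
      rw [ih [] (fun x hx => hb x (by simp [hx]))]
      simp [pvG_nil]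
    | cons x as2 =>
      simp only [List.cons_append, pvG]
      by_cases hbx : b > x
      · rw [if_pos hbx, if_pos hbx, ih as2 (fun y hy => hb y (by simp [hy]))]
      · rw [if_neg hbx, if_neg hbx]
        exact ih (x :: as2) (fun y hy => hb y (by simp [hy]))

-- L1: with strictly more b's than a's, dropping the smallest b changes nothing
theorem pvG_drop_min :
    ∀ (as : List Int) (b : Int) (bs : List Int), (b :: bs).Pairwise (· ≤ ·) →
      as.length ≤ bs.length → pvG as (b :: bs) = pvG as bs := by
  intro as
  induction as with
  | nil => intro b bs _ _; simp [pvG_nil]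
  | cons a as2 ih =>
    intro b bs hp hlen
    by_cases hba : b > a
    · cases bs with
      | nil => simp at hlen
      | cons b2 bs2 =>
        have hb2 : b ≤ b2 := (List.pairwise_cons.mp hp).1 b2 (by simp)
        have hb2a : b2 > a := by omega
        simp only [pvG, if_pos hba, if_pos hb2a]
        have := ih b2 bs2 ((List.pairwise_cons.mp hp).2) (by simpa using hlen)
        omega
    · simp only [pvG, if_neg hba]

-- L2: a b-card beating the largest a-card matches it; both disappear
theorem pvG_match_max (a bmax : Int) (hab : bmax > a) :
    ∀ (bs' as : List Int), (∀ x ∈ as, x ≤ a) →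
      pvG (as ++ [a]) (bs' ++ [bmax]) = 1 + pvG as bs' := by
  intro bs'
  induction bs' with
  | nil =>
    intro as ha
    cases as with
    | nil => simp [pvG, hab]
    | cons x as2 =>
      have : bmax > x := by have := ha x (by simp); omega
      simp [pvG, this]
  | cons b bs'' ih =>
    intro as ha
    cases as with
    | nil =>
      simp only [List.nil_append, List.cons_append, pvG]
      by_cases hb : b > a
      · rw [if_pos hb, pvG_nil]
      · rw [if_neg hb]
        have h2 := ih [] (by simp)
        simp only [List.nil_append] at h2
        rw [h2, pvG_nil]
    | cons x as2 =>
      simp only [List.cons_append, pvG]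
      by_cases hbx : b > x
      · rw [if_pos hbx, if_pos hbx, ih as2 (fun y hy => ha y (by simp [hy]))]
      · rw [if_neg hbx, if_neg hbx]
        exact ih (x :: as2) ha

-- pvH only ever consumes the first |bs| cards of the descending list
theorem pvH_take : ∀ (ad bs : List Int), pvH ad bs = pvH (ad.take bs.length) bs := by
  intro ad
  induction ad with
  | nil => intro bs; simp
  | cons a ad' ih =>
    intro bs
    cases bs with
    | nil => simp [pvH]
    | cons b0 rest =>
      simp only [pvH, List.length_cons, List.take_succ_cons]
      by_cases hg : PySem.List.pyGetD (b0 :: rest) (-1) 0 > a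
      · rw [if_pos hg, if_pos hg, ih ((b0 :: rest).dropLast)]
        have : ((b0 :: rest).dropLast).length = rest.length := by
          simp [List.length_dropLast]
        rw [this]
      · rw [if_neg hg, if_neg hg, ih ((b0 :: rest).tail)]
        rfl

-- main equivalence of the two greedy procedures (|ad| ≤ |bs|, both sorted)
theorem pvH_eq_pvG :
    ∀ (ad bs : List Int), ad.Pairwise (fun a b => b ≤ a) → bs.Pairwise (· ≤ ·) →
      ad.length ≤ bs.length → pvH ad bs = pvG ad.reverse bs := by
  intro ad
  induction ad with
  | nil => intro bs _ _ _; simp [pvH, pvG_nil]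
  | cons a ad' ih =>
    intro bs hpad hpbs hlen
    rcases bs.eq_nil_or_concat with rfl | ⟨L, bmax, hLB⟩
    · simp at hlen
    · rw [List.concat_eq_append] at hLB
      subst hLB
      have hLlen : (L ++ [bmax]).length = L.length + 1 := by simp
      have hha : ∀ x ∈ ad', x ≤ a := (List.pairwise_cons.mp hpad).1
      have hha' : ∀ x ∈ ad'.reverse, x ≤ a := fun x hx => hha x (List.mem_reverse.mp hx)
      have hLb : ∀ x ∈ L, x ≤ bmax := by
        intro x hx
        exact (List.pairwise_append.mp hpbs).2.2 x hx bmax (by simp)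
      simp only [pvH, PySem.List.pyGetD_neg_one_append_singleton, hLlen]
      rw [if_neg (by omega : ¬ (L.length + 1 = 0))]
      by_cases hg : bmax > a
      · rw [if_pos hg, List.dropLast_concat]
        rw [ih L ((List.pairwise_cons.mp hpad).2) ((List.pairwise_append.mp hpbs).1)
            (by simp at hlen; omega)]
        rw [List.reverse_cons, pvG_match_max a bmax hg L ad'.reverse hha']
      · rw [if_neg hg]
        have hball : ∀ b ∈ L ++ [bmax], b ≤ a := by
          intro b hb
          rcases List.mem_append.mp hb with h | h
          · have := hLb b h; omega
          · simp at h; omega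
        rw [List.reverse_cons, pvG_append_unbeaten a (L ++ [bmax]) ad'.reverse hball]
        obtain ⟨b0, rest, hcons⟩ : ∃ b0 rest, L ++ [bmax] = b0 :: rest := by
          cases L with
          | nil => exact ⟨bmax, [], rfl⟩
          | cons x xs => exact ⟨x, xs ++ [bmax], by simp⟩
        have hlen' : ad'.length ≤ rest.length := by
          have : (L ++ [bmax]).length = rest.length + 1 := by rw [hcons]; simp
          simp at hlen this; omega
        rw [hcons, pvG_drop_min ad'.reverse b0 rest (hcons ▸ hpbs) (by simpa using hlen')]
        rw [← ih rest (List.pairwise_cons.mp hpad).2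
            (List.pairwise_cons.mp (hcons ▸ hpbs)).2 hlen']
        rfl

-- bridge: A's loop over an index list computes pvH of the fetched values
theorem loopA_bridge (As : List Int) :
    ∀ (il q : List Int) (ans : Int),
      pvLoopA As il q ans = ans + pvH (il.map (fun i => PySem.List.pyGetD As i 0)) q := by
  intro il
  induction il with
  | nil => intro q ans; simp [pvLoopA, pvH]
  | cons i rest ih =>
    intro q ans
    simp only [pvLoopA, List.map_cons, pvH]
    by_cases h0 : q.length = 0
    · rw [if_pos h0, if_pos h0]; omega
    · rw [if_neg h0, if_neg h0]
      by_cases hg : PySem.List.pyGetD q (-1) 0 > PySem.List.pyGetD As i 0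
      · rw [if_pos hg, if_pos hg, ih]; omega
      · rw [if_neg hg, if_neg hg, ih]

-- take of a reverse is the reverse of a drop
theorem take_reverse_eq (l : List Int) (m : Nat) :
    l.reverse.take m = (l.drop (l.length - m)).reverse := by
  apply List.ext_getElem
  · simp; omega
  · intro k h1 h2
    simp only [List.getElem_take, List.getElem_reverse, List.getElem_drop]
    congr 1
    have hd : (l.drop (l.length - m)).length = l.length - (l.length - m) := by simp
    simp only [List.length_take, List.length_reverse, hd] at h1 h2 ⊢
    omega

-- combined: pvH on the full reversed A equals pvG on the top-|bs| slice of A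
theorem key (as bs : List Int) (hpa : as.Pairwise (· ≤ ·)) (hpb : bs.Pairwise (· ≤ ·)) :
    pvH as.reverse bs = pvG (as.drop (as.length - bs.length)) bs := by
  rw [pvH_take, take_reverse_eq]
  set as' := as.drop (as.length - bs.length) with has'
  have hsub : as'.Sublist as := List.drop_sublist _ _
  have hpa' : as'.Pairwise (· ≤ ·) := hpa.sublist hsub
  have hrev : as'.reverse.Pairwise (fun a b => b ≤ a) := by
    rw [List.pairwise_reverse]; exact hpa'
  have hlen : as'.reverse.length ≤ bs.length := by
    simp [has', List.length_drop]; omega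
  rw [pvH_eq_pvG as'.reverse bs hrev hpb (by simpa using hlen), List.reverse_reverse]

-- ===== B-side: feasibility characterisation and binary-search correctness =====

-- 'k wins are achievable': the k largest b's pairwise beat the k smallest a's
def pvFeas (as bs : List Int) (k : Int) : Prop :=
  0 ≤ k ∧ k ≤ (as.length : Int) ∧ k ≤ (bs.length : Int) ∧
  ∀ j : Int, 0 ≤ j → j < k →
    PySem.List.pyGetD as j 0 < PySem.List.pyGetD bs ((bs.length : Int) - k + j) 0

-- indexing a cons at a positive position
theorem pyGetD_cons_pos (x : Int) (xs : List Int) (i d : Int)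
    (h1 : 1 ≤ i) (h2 : i < (xs.length : Int) + 1) :
    PySem.List.pyGetD (x :: xs) i d = PySem.List.pyGetD xs (i - 1) d := by
  rw [PySem.List.pyGetD_eq_getElem _ _ (by omega) (by simp; omega),
      PySem.List.pyGetD_eq_getElem _ _ (by omega) (by omega)]
  have hn : i.toNat = (i - 1).toNat + 1 := by omega
  simp only [hn, List.getElem_cons_succ]

-- an element of a sorted cons at a valid index is at least the head
theorem head_le_pyGetD (b : Int) (bs : List Int) (i : Int)
    (hp : (b :: bs).Pairwise (· ≤ ·)) (h1 : 0 ≤ i) (h2 : i < (bs.length : Int) + 1) :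
    b ≤ PySem.List.pyGetD (b :: bs) i 0 := by
  by_cases h0 : i = 0
  · subst h0; rw [PySem.List.pyGetD_zero_cons]
  · rw [pyGetD_cons_pos b bs i 0 (by omega) h2]
    rw [PySem.List.pyGetD_eq_getElem _ _ (by omega) (by omega)]
    exact (List.pairwise_cons.mp hp).1 _ (List.getElem_mem _)

-- the greedy count is exactly the greatest feasible k
theorem pvFeas_iff :
    ∀ (bs as : List Int) (k : Int), bs.Pairwise (· ≤ ·) →
      (pvFeas as bs k ↔ 0 ≤ k ∧ k ≤ pvG as bs) := by
  intro bs
  induction bs with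
  | nil =>
    intro as k _
    constructor
    · rintro ⟨hk0, _, hk2, _⟩
      have : pvG as [] = 0 := by cases as <;> rfl
      simp at hk2; omega
    · rintro ⟨hk0, hk⟩
      have : pvG as [] = 0 := by cases as <;> rfl
      rw [this] at hk
      exact ⟨hk0, by omega, by simp; omega, fun j hj0 hjk => by omega⟩
  | cons b bs' ih =>
    intro as k hpb
    have hpb' : bs'.Pairwise (· ≤ ·) := (List.pairwise_cons.mp hpb).2
    cases as with
    | nil =>
      constructor
      · rintro ⟨hk0, hk1, _, _⟩
        simp at hk1
        rw [pvG_nil]; omega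
      · rintro ⟨hk0, hk⟩
        rw [pvG_nil] at hk
        exact ⟨hk0, by simp; omega, by simp; omega, fun j hj0 hjk => by omega⟩
    | cons a as' =>
      by_cases hba : b > a
      · rw [show pvG (a :: as') (b :: bs') = 1 + pvG as' bs' by simp [pvG, hba]]
        constructor
        · rintro ⟨hk0, hk1, hk2, hj⟩
          by_cases hk : k = 0
          · have := pvG_nonneg as' bs'; omega
          · have hfe : pvFeas as' bs' (k - 1) := by
              refine ⟨by omega, by simp at hk1 ⊢; omega, by simp at hk2 ⊢; omega, ?_⟩
              intro j hj0 hjk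
              have h := hj (j + 1) (by omega) (by omega)
              rw [pyGetD_cons_pos a as' (j + 1) 0 (by omega)
                    (by simp at hk1; omega)] at h
              rw [pyGetD_cons_pos b bs' (((b :: bs').length : Int) - k + (j + 1)) 0
                    (by simp at hk2 ⊢; omega) (by simp at hk2 ⊢; omega)] at h
              simp only [List.length_cons] at h
              have e1 : (j + 1 - 1 : Int) = j := by ring
              rw [e1] at h
              rw [show (((bs'.length + 1 : Nat) : Int) - k + (j + 1) - 1)
                  = (bs'.length : Int) - (k - 1) + j by push_cast; ring] at h
              exact h
            have := (ih as' (k - 1) hpb').mp hfe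
            omega
        · rintro ⟨hk0, hk⟩
          by_cases hk00 : k = 0
          · exact ⟨hk0, by omega, by omega, fun j hj0 hjk => by omega⟩
          · have hfe : pvFeas as' bs' (k - 1) :=
              (ih as' (k - 1) hpb').mpr ⟨by omega, by omega⟩
            obtain ⟨_, hb1, hb2, hbj⟩ := hfe
            refine ⟨hk0, by simp; omega, by simp; omega, ?_⟩
            intro j hj0 hjk
            by_cases hj00 : j = 0
            · subst hj00
              rw [PySem.List.pyGetD_zero_cons]
              have hble := head_le_pyGetD b bs' (((b :: bs').length : Int) - k + 0)
                hpb (by simp; omega) (by simp; omega)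
              omega
            · rw [pyGetD_cons_pos a as' j 0 (by omega) (by simp; omega)]
              rw [pyGetD_cons_pos b bs' (((b :: bs').length : Int) - k + j) 0
                    (by simp; omega) (by simp; omega)]
              have h := hbj (j - 1) (by omega) (by omega)
              rw [show (((b :: bs').length : Int) - k + j - 1)
                  = (bs'.length : Int) - (k - 1) + (j - 1) by simp; ring]
              exact h
      · rw [show pvG (a :: as') (b :: bs') = pvG (a :: as') bs' by simp [pvG, hba]]
        constructor
        · rintro ⟨hk0, hk1, hk2, hj⟩
          by_cases hk : k = 0
          · have := pvG_nonneg (a :: as') bs'; omega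
          · have hkm : k ≤ (bs'.length : Int) := by
              by_contra hgt
              have hkeq : k = (bs'.length : Int) + 1 := by simp at hk2; omega
              have h := hj 0 (by omega) (by omega)
              rw [PySem.List.pyGetD_zero_cons] at h
              rw [show (((b :: bs').length : Int) - k + 0) = 0 by simp [hkeq]] at h
              rw [PySem.List.pyGetD_zero_cons] at h
              omega
            have hfe : pvFeas (a :: as') bs' k := by
              refine ⟨hk0, hk1, hkm, ?_⟩
              intro j hj0 hjk
              have h := hj j hj0 hjk
              rw [pyGetD_cons_pos b bs' (((b :: bs').length : Int) - k + j) 0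
                    (by simp; omega) (by simp; omega)] at h
              rw [show (((b :: bs').length : Int) - k + j - 1)
                  = (bs'.length : Int) - k + j by simp; ring] at h
              exact h
            have := (ih (a :: as') k hpb').mp hfe
            omega
        · rintro ⟨hk0, hk⟩
          have hkm : k ≤ (bs'.length : Int) :=
            le_trans hk (pvG_le_right bs' (a :: as'))
          have hfe : pvFeas (a :: as') bs' k :=
            (ih (a :: as') k hpb').mpr ⟨hk0, hk⟩
          obtain ⟨_, hb1, hb2, hbj⟩ := hfe
          refine ⟨hk0, hb1, by simp; omega, ?_⟩
          intro j hj0 hjk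
          rw [pyGetD_cons_pos b bs' (((b :: bs').length : Int) - k + j) 0
                (by simp; omega) (by simp; omega)]
          rw [show (((b :: bs').length : Int) - k + j - 1)
              = (bs'.length : Int) - k + j by simp; ring]
          exact hbj j hj0 hjk

-- ok(k) decides feasibility on the searched range
theorem pvOk_iff (a B : List Int) (k : Int)
    (h0 : 0 ≤ k) (h1 : k ≤ (a.length : Int)) (h2 : k ≤ (B.length : Int)) :
    pvOk a B k = true ↔ pvFeas a B k := by
  unfold pvOk pvFeas
  rw [List.all_eq_true]
  constructor
  · intro h
    refine ⟨h0, h1, h2, ?_⟩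
    intro j hj0 hjk
    have := h j (PySem.List.mem_pyRange_one.mpr ⟨hj0, hjk⟩)
    simpa using this
  · rintro ⟨_, _, _, hj⟩ j hjmem
    obtain ⟨hj0, hjk⟩ := PySem.List.mem_pyRange_one.mp hjmem
    simpa using hj j hj0 hjk

-- the binary search finds g when ok decides 'k ≤ g' on [lo, hi]
theorem pvBS_correct (a B : List Int) (g : Int) :
    ∀ (N : Nat) (lo hi : Int), (hi - lo).toNat ≤ N → lo ≤ g → g ≤ hi →
      (∀ k, lo ≤ k → k ≤ hi → (pvOk a B k = true ↔ k ≤ g)) →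
      pvBS a B lo hi = g := by
  intro N
  induction N with
  | zero =>
    intro lo hi hN hlo hhi _
    rw [pvBS]
    rw [dif_neg (by omega)]
    omega
  | succ N ih =>
    intro lo hi hN hlo hhi H
    rw [pvBS]
    by_cases hlt : lo < hi
    · rw [dif_pos hlt]
      have hb := PySem.Int.floordiv_two_mid_bounds (lo := lo + 1) (hi := hi) (by omega)
      have he : lo + 1 + hi = lo + hi + 1 := by ring
      rw [he] at hb
      set mid := PySem.Int.floordiv (lo + hi + 1) 2 with hmid
      by_cases hok : pvOk a B mid = true
      · rw [if_pos hok]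
        have hmg : mid ≤ g := (H mid (by omega) (by omega)).mp hok
        exact ih mid hi (by omega) hmg hhi (fun k hk1 hk2 => H k (by omega) hk2)
      · rw [if_neg hok]
        have hmg : ¬ (mid ≤ g) := fun hc => hok ((H mid (by omega) (by omega)).mpr hc)
        exact ih lo (mid - 1) (by omega) hlo (by omega)
          (fun k hk1 hk2 => H k hk1 (by omega))
    · rw [dif_neg hlt]; omega

-- ===== VERDICT (by name: the statement is the Claim_ definition above) =====
theorem solution_spec : Claim_equal_solution := by
  intro A B _
  unfold Spec_solution solution solution_alt
  simp only []
  set As := PySem.List.sorted A id false with hAs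
  set Bs := PySem.List.sorted B id false with hBs
  have hpa : As.Pairwise (· ≤ ·) := by
    have := PySem.List.sorted_pairwise (xs := A) (key := id)
    simpa using this
  have hpb : Bs.Pairwise (· ≤ ·) := by
    have := PySem.List.sorted_pairwise (xs := B) (key := id)
    simpa using this
  -- A side reduces to the greedy count on the top-|Bs| slice of As
  rw [loopA_bridge]
  rw [PySem.List.pyRange_neg_one_eq_reverse]
  have h01 : ((-1 : Int) + 1) = 0 := by norm_num
  have h02 : ((As.length : Int) - 1 + 1) = (As.length : Int) := by ring
  rw [h01, h02, List.map_reverse, PySem.List.map_pyGetD_pyRange_zero']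
  rw [key As Bs hpa hpb]
  -- B side: the binary search finds that same greedy count
  have hk : (0 : Int) ≤ max 0 ((As.length : Int) - (Bs.length : Int)) := le_max_left _ _
  rw [PySem.List.slice_from _ hk]
  have hkn : (max 0 ((As.length : Int) - (Bs.length : Int))).toNat = As.length - Bs.length := by
    omega
  rw [hkn]
  set a := As.drop (As.length - Bs.length) with ha
  set g := pvG a Bs with hg
  have hga : g ≤ (a.length : Int) := pvG_le_left a Bs
  have hgb : g ≤ (Bs.length : Int) := pvG_le_right Bs a
  have hg0 : 0 ≤ g := pvG_nonneg a Bs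
  have hmain : pvBS a Bs 0 (min ((a.length : Int)) ((Bs.length : Int))) = g := by
    refine pvBS_correct a Bs g ((min ((a.length : Int)) ((Bs.length : Int)) - 0).toNat)
      0 (min ((a.length : Int)) ((Bs.length : Int))) (le_refl _) hg0 (by omega) ?_
    intro k hk1 hk2
    rw [pvOk_iff a Bs k hk1 (by omega) (by omega)]
    rw [pvFeas_iff Bs a k hpb]
    omega
  rw [hmain]
  omega
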